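-- pv_equiv track=rewrite | github.com/nonette/euler | p054.py | unclump
-- ===== SOURCE A (Python) =====
-- def unclump(clumpedcards):
--     clumpedcards.append(('', -1)) #dummy to mark end
--     unclumpedcards = []
--     curcount = 0
--     curvals = []
--     for val, count in clumpedcards:
--         if count == curcount:
--             curvals.append(val)
--         else:
--             curvals = sorted(curvals)[::-1]
--             for v in curvals:
--                 unclumpedcards += [v]*curcount
--             curvals = [val]
--             curcount = count
--     return unclumpedcards
-- ===== SOURCE B (Python) =====
-- def unclump(clumpedcards):
--     clumpedcards.append(('', -1))  # keep A's in-place mutation of the argument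
--     out = []
--     rest = clumpedcards
--     while rest:
--         c = rest[0][1]
--         i = 1
--         while i < len(rest) and rest[i][1] == c:
--             i += 1
--         for v in sorted(p[0] for p in rest[:i])[::-1]:
--             out += [v] * c
--         rest = rest[i:]
--     return out
-- ===== Notes on version B (the rewrite author's own statement) =====
-- stated objective: alternative
-- what changed: Replaces A's sentinel-driven curcount/curvals flush state machine by explicit consecutive grouping: repeatedly take the leading run of pairs with equal count, emit sorted(vals)[::-1] repeated count times, and continue on the remainder.
import Mathlib
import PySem

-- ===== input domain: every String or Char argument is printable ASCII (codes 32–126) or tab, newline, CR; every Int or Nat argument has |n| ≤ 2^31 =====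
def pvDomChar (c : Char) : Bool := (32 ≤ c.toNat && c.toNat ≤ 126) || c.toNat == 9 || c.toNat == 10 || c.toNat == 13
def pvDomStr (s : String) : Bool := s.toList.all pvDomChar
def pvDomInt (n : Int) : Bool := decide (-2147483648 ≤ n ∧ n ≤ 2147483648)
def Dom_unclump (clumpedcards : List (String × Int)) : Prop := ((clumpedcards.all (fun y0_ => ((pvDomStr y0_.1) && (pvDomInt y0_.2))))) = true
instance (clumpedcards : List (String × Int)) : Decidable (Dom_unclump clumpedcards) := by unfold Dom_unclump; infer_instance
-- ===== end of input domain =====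

-- B replaces A's sentinel/flush state machine by explicit consecutive grouping (take/drop the
-- leading run) — objective: alternative decomposition, same cost. Like A, B appends the dummy
-- ('', -1) to the argument in place; the theorems are about the return value only.


-- ===== PORT A =====
def unclump (clumpedcards : List (String × Int)) : List String :=
  -- clumpedcards.append(('', -1))
  let cc := clumpedcards ++ [("", -1)]
  -- for val, count in clumpedcards: …
  let st := cc.foldl (fun (st : List String × Int × List String) p =>
    let unclumpedcards := st.1
    let curcount := st.2.1
    let curvals := st.2.2
    if p.2 == curcount then
      (unclumpedcards, curcount, curvals ++ [p.1])
    else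
      -- curvals = sorted(curvals)[::-1]
      let cv := (PySem.List.slice? (PySem.List.sorted curvals (fun x => x) false) none none (-1)).getD []
      -- for v in curvals: unclumpedcards += [v]*curcount
      let out := cv.foldl (fun acc v => acc ++ PySem.List.pyRepeat [v] curcount) unclumpedcards
      (out, p.2, [p.1]))
    ([], (0 : Int), ([] : List String))
  st.1

-- ===== PORT B =====
-- the while loop over `rest`: emit the leading run of equal counts, recurse on the remainder
def unclumpGo : List (String × Int) → List String
  | [] => []
  | (v, c) :: rest =>
    let grp := v :: (rest.takeWhile (fun p => p.2 == c)).map Prod.fst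
    let desc := (PySem.List.slice? (PySem.List.sorted grp (fun x => x) false) none none (-1)).getD []
    desc.foldl (fun acc w => acc ++ PySem.List.pyRepeat [w] c) [] ++
      unclumpGo (rest.dropWhile (fun p => p.2 == c))
  termination_by L => L.length
  decreasing_by
    simpa using Nat.lt_succ_of_le (List.length_dropWhile_le _ _)

def unclump_alt (clumpedcards : List (String × Int)) : List String :=
  unclumpGo (clumpedcards ++ [("", -1)])

-- ===== PRECONDITION & SPEC =====
def Spec_unclump (clumpedcards : List (String × Int)) (out : List String) : Prop := out = unclump_alt clumpedcards
instance (clumpedcards : List (String × Int)) (out : List String) : Decidable (Spec_unclump clumpedcards out) := by unfold Spec_unclump; infer_instance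

-- ===== CLAIM (what is proved, stated in full; the proofs are below) =====
def Claim_equal_unclump : Prop := ∀ (clumpedcards : List (String × Int)), Dom_unclump clumpedcards → Spec_unclump clumpedcards (unclump clumpedcards)

-- ===== LEMMAS AND PROOFS =====

-- what one flush of A (and one group of B) emits
def pvEmit (c : Int) (vs : List String) : List String :=
  (PySem.List.sorted vs (fun x => x) false).reverse.flatMap (fun w => List.replicate c.toNat w)

theorem pvEmit_nonpos (c : Int) (hc : c ≤ 0) (vs : List String) : pvEmit c vs = [] := by
  unfold pvEmit
  have : c.toNat = 0 := Int.toNat_of_nonpos hc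
  simp [this]

-- A's pending-state loop, abstracted
def pvPend (c : Int) (vs : List String) : List (String × Int) → List String
  | [] => []
  | (v, k) :: rest => if k == c then pvPend c (vs ++ [v]) rest else pvEmit c vs ++ pvPend k [v] rest

-- count of the last element (default c)
def pvLast (c : Int) : List (String × Int) → Int
  | [] => c
  | (_, k) :: rest => pvLast k rest

theorem pvLast_append (c k : Int) (v : String) (L : List (String × Int)) :
    pvLast c (L ++ [(v, k)]) = k := by
  induction L generalizing c with
  | nil => rfl
  | cons p t ih => simpa [pvLast] using ih p.2

theorem unclump_foldl (L : List (String × Int)) (out : List String) (c : Int) (vs : List String) :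
    (L.foldl (fun (st : List String × Int × List String) p =>
      if p.2 == st.2.1 then (st.1, st.2.1, st.2.2 ++ [p.1])
      else
        let cv := (PySem.List.slice? (PySem.List.sorted st.2.2 (fun x => x) false) none none (-1)).getD []
        (cv.foldl (fun acc v => acc ++ PySem.List.pyRepeat [v] st.2.1) st.1, p.2, [p.1]))
      (out, c, vs)).1 = out ++ pvPend c vs L := by
  induction L generalizing out c vs with
  | nil => simp [pvPend]
  | cons p t ih =>
    obtain ⟨v, k⟩ := p
    by_cases h : k == c
    · have hc : k = c := by simpa using h
      subst hc
      simp only [List.foldl_cons, beq_self_eq_true, if_pos]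
      rw [ih]
      simp [pvPend]
    · simp only [List.foldl_cons, h, if_neg, Bool.false_eq_true, not_false_iff]
      rw [ih]
      simp [pvPend, h, pvEmit, PySem.List.slice?_none_none_neg_one,
        PySem.List.pyRepeat_singleton, List.append_assoc,
        List.flatMap_def]

theorem unclumpGo_cons (v : String) (c : Int) (rest : List (String × Int)) :
    unclumpGo ((v, c) :: rest) =
      pvEmit c (v :: (rest.takeWhile (fun p => p.2 == c)).map Prod.fst) ++
        unclumpGo (rest.dropWhile (fun p => p.2 == c)) := by
  rw [unclumpGo]
  simp [pvEmit, PySem.List.slice?_none_none_neg_one,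
    PySem.List.pyRepeat_singleton, List.flatMap_def]

theorem pvPend_eq_go (L : List (String × Int)) (c : Int) (vs : List String)
    (h : pvLast c L ≤ 0) :
    pvPend c vs L =
      pvEmit c (vs ++ (L.takeWhile (fun p => p.2 == c)).map Prod.fst) ++
        unclumpGo (L.dropWhile (fun p => p.2 == c)) := by
  induction L generalizing c vs with
  | nil =>
    simp only [pvPend, List.takeWhile_nil, List.dropWhile_nil, List.map_nil, List.append_nil]
    rw [unclumpGo, pvEmit_nonpos c (by simpa [pvLast] using h)]
    rfl
  | cons p t ih =>
    obtain ⟨v, k⟩ := p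
    have hlast : pvLast k t ≤ 0 := by simpa [pvLast] using h
    by_cases hk : k == c
    · have hc : k = c := by simpa using hk
      subst hc
      simp only [pvPend, List.takeWhile_cons, List.dropWhile_cons, hk, if_pos]
      rw [ih _ _ hlast]
      simp
    · simp only [pvPend, List.takeWhile_cons, List.dropWhile_cons, hk, if_neg,
        Bool.false_eq_true, not_false_iff]
      rw [ih _ _ hlast, unclumpGo_cons]
      simp

theorem unclumpGo_dropWhile_zero (L : List (String × Int)) :
    unclumpGo (L.dropWhile (fun p => p.2 == (0 : Int))) = unclumpGo L := by
  cases L with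
  | nil => simp
  | cons p rest =>
    obtain ⟨v, k⟩ := p
    by_cases hk : k == (0 : Int)
    · have hc : k = 0 := by simpa using hk
      subst hc
      rw [unclumpGo_cons]
      simp [pvEmit_nonpos 0 le_rfl]
    · simp [hk]

-- ===== VERDICT (by name: the statement is the Claim_ definition above) =====
theorem unclump_spec : Claim_equal_unclump := by
  intro cc _
  show unclump cc = unclump_alt cc
  unfold unclump unclump_alt
  rw [unclump_foldl]
  have h0 : pvLast 0 (cc ++ [("", -1)]) ≤ 0 := by rw [pvLast_append]; norm_num
  rw [pvPend_eq_go _ _ _ h0]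
  rw [pvEmit_nonpos 0 le_rfl]
  simpa using unclumpGo_dropWhile_zero (cc ++ [("", -1)])
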